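-- pv_equiv track=rewrite | github.com/agh-bit-academy/SummerProject2022 | WDI/Zestaw_4/Zadanie_18/sol.py | sum_horizontal
-- ===== SOURCE A (Python) =====
-- def sum_horizontal(A):
--     max_sum = 0
--     sum_prefix_h = [[A[i][j] for j in range(len(A[0]))] for i in range(len(A))]
--     for i in range(len(A)):
--         for j in range(1, len(A[0])):
--             sum_prefix_h[i][j] += sum_prefix_h[i][j - 1]
--
--     if len(A[0]) <= 10:
--         for i in range(len(A)):
--             max_sum = max(max_sum, sum_prefix_h[i][len(A[0]) - 1])
--     else:
--         for i in range(len(A)):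
--             max_sum = max(max_sum, sum_prefix_h[i][9])
--             for j in range(10, len(A[0])):
--                 max_sum = max(max_sum, sum_prefix_h[i][j] - sum_prefix_h[i][j - 10])
--     return max_sum
-- ===== SOURCE B (Python) =====
-- def sum_horizontal(A):
--     width = len(A[0])
--     k = width if width <= 10 else 10
--     best = 0
--     for row in A:
--         s = 0
--         for j in range(k):
--             s += row[j]
--         best = max(best, s)
--         for j in range(k, width):
--             s += row[j] - row[j - k]
--             best = max(best, s)
--     return best
-- ===== Notes on version B (the rewrite author's own statement) =====
-- stated objective: faster
-- what changed: Replaces the full prefix-sum table (an extra O(rows*width) list of lists plus a second pass) with a single sliding-window sum per row, keeping only one running sum and the running maximum.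
import Mathlib
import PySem

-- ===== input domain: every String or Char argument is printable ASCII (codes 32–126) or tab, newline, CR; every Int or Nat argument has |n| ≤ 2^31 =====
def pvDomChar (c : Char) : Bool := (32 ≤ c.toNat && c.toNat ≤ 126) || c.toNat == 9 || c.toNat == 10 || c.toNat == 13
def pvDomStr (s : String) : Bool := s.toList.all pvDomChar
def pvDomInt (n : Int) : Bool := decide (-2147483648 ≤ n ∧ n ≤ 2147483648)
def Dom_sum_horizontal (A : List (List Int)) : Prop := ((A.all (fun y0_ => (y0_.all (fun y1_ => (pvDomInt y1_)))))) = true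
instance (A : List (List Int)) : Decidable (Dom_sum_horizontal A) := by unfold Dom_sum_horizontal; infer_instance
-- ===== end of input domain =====

-- B replaces A's full prefix-sum table (extra O(rows*width) storage and a second pass)
-- with a single sliding-window sum per row; equal return value on Pre_ is proved below.

-- ===== PORT A =====
def sum_horizontal (A : List (List Int)) : Int :=
  let w : Int := (PySem.List.pyGetD A 0 []).length
  -- build [[A[i][j] for j in range(len(A[0]))] …], then the in-place prefix loop
  -- 'for j in range(1, len(A[0])): p[j] += p[j-1]' (each outer-i iteration touches only row i)
  let P : List (List Int) := A.map (fun row =>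
    (PySem.List.pyRange 1 w 1).foldl
      (fun p j => PySem.List.pySetD p j (PySem.List.pyGetD p j 0 + PySem.List.pyGetD p (j-1) 0))
      ((PySem.List.pyRange 0 w 1).map (fun j => PySem.List.pyGetD row j 0)))
  if w ≤ 10 then
    P.foldl (fun m p => max m (PySem.List.pyGetD p (w-1) 0)) 0
  else
    P.foldl (fun m p =>
      (PySem.List.pyRange 10 w 1).foldl
        (fun m j => max m (PySem.List.pyGetD p j 0 - PySem.List.pyGetD p (j-10) 0))
        (max m (PySem.List.pyGetD p 9 0))) 0

-- ===== PORT B =====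
def sum_horizontal_alt (A : List (List Int)) : Int :=
  let w : Int := (PySem.List.pyGetD A 0 []).length
  let k : Int := if w ≤ 10 then w else 10
  A.foldl (fun best row =>
    let s := (PySem.List.pyRange 0 k 1).foldl (fun s j => s + PySem.List.pyGetD row j 0) 0
    ((PySem.List.pyRange k w 1).foldl
      (fun bs j =>
        let s' := bs.2 + PySem.List.pyGetD row j 0 - PySem.List.pyGetD row (j - k) 0
        (max bs.1 s', s'))
      (max best s, s)).1) 0

-- ===== PRECONDITION & SPEC =====
-- Pre_ excludes exactly the inputs where the Python A raises IndexError: an empty matrix,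
-- a matrix whose first row is empty, and rows shorter than the first row.
def Pre_sum_horizontal (A : List (List Int)) : Prop :=
  A ≠ [] ∧ 0 < (A.headD []).length ∧ ∀ row ∈ A, (A.headD []).length ≤ row.length
instance (A : List (List Int)) : Decidable (Pre_sum_horizontal A) := by
  unfold Pre_sum_horizontal; infer_instance
def pvWitness_sum_horizontal : List (List Int) := [[1, -2], [3, 4]]

def Spec_sum_horizontal (A : List (List Int)) (out : Int) : Prop := out = sum_horizontal_alt A
instance (A : List (List Int)) (out : Int) : Decidable (Spec_sum_horizontal A out) := by
  unfold Spec_sum_horizontal; infer_instance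

-- ===== CLAIM (what is proved, stated in full; the proofs are below) =====
def Claim_equal_sum_horizontal : Prop := ∀ (A : List (List Int)), Dom_sum_horizontal A → Pre_sum_horizontal A → Spec_sum_horizontal A (sum_horizontal A)
-- ===== LEMMAS AND PROOFS =====

-- prefix sum of the first j entries of a row (0 for j ≤ 0)
def Sp (row : List Int) (j : Int) : Int := (row.take j.toNat).sum

lemma getRow (row : List Int) (j : Int) (h0 : 0 ≤ j) (h1 : j < row.length) :
    PySem.List.pyGetD row j 0 = Sp row (j + 1) - Sp row j := by
  rw [PySem.List.pyGetD_eq_getElem row 0 h0 h1]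
  unfold Sp
  rw [show (j + 1).toNat = j.toNat + 1 by omega,
    List.sum_take_succ row j.toNat (by omega)]
  ring

-- the in-place prefix loop of A, run over range(1, m+1): cells ≤ m hold prefix sums,
-- cells beyond are untouched; the length never changes
lemma prefix_invariant (row : List Int) (w : Int) (hw : 1 ≤ w) (hlen : w ≤ row.length)
    (m : Nat) (hm : (m : Int) < w) :
    (((PySem.List.pyRange 1 ((m : Int) + 1) 1).foldl
        (fun p j => PySem.List.pySetD p j (PySem.List.pyGetD p j 0 + PySem.List.pyGetD p (j-1) 0))
        ((PySem.List.pyRange 0 w 1).map (fun j => PySem.List.pyGetD row j 0)))).length = w.toNat ∧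
    ∀ j : Int, 0 ≤ j → j < w →
      PySem.List.pyGetD
        ((PySem.List.pyRange 1 ((m : Int) + 1) 1).foldl
          (fun p j => PySem.List.pySetD p j (PySem.List.pyGetD p j 0 + PySem.List.pyGetD p (j-1) 0))
          ((PySem.List.pyRange 0 w 1).map (fun j => PySem.List.pyGetD row j 0))) j 0
      = if j ≤ (m : Int) then Sp row (j + 1) else PySem.List.pyGetD row j 0 := by
  induction m with
  | zero =>
    rw [show ((0 : Nat) : Int) + 1 = 1 by norm_num, PySem.List.pyRange_one_eq_nil le_rfl]
    simp only [List.foldl_nil]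
    constructor
    · simp [PySem.List.length_pyRange_one]
    · intro j h0 h1
      rw [PySem.List.pyGetD_map_pyRange_of_nonneg _ w j 0 h0 h1]
      by_cases hj : j ≤ ((0 : Nat) : Int)
      · have hj0 : j = 0 := by omega
        rw [if_pos hj, hj0, getRow row 0 le_rfl (by omega)]
        simp [Sp]
      · rw [if_neg hj]
  | succ m ih =>
    have hm' : (m : Int) < w := by omega
    obtain ⟨ihlen, ihget⟩ := ih hm'
    rw [show ((m + 1 : Nat) : Int) + 1 = ((m : Int) + 1) + 1 by omega,
      PySem.List.pyRange_one_succ_right (by omega), List.foldl_append]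
    simp only [List.foldl_cons, List.foldl_nil]
    rw [show (m : Int) + 1 - 1 = (m : Int) by ring]
    rw [ihget ((m : Int) + 1) (by omega) (by omega), ihget (m : Int) (by omega) (by omega)]
    rw [if_neg (by omega), if_pos le_rfl]
    rw [getRow row ((m : Int) + 1) (by omega) (by omega)]
    rw [show (m : Int) + 1 = ((m + 1 : Nat) : Int) by omega] at ihlen ihget ⊢
    refine ⟨by rw [PySem.List.pySetD_natCast, List.length_set, ihlen], ?_⟩
    intro j h0 h1
    rw [show j = ((j.toNat : Nat) : Int) by omega]
    rw [PySem.List.pyGetD_pySetD_natCast _ (m + 1) j.toNat _ 0 (by rw [ihlen]; omega)]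
    by_cases hjm : j.toNat = m + 1
    · rw [if_pos hjm, if_pos (by omega), hjm]
      ring
    · rw [if_neg hjm, ihget ((j.toNat : Nat) : Int) (by omega) (by omega)]
      by_cases hza : ((j.toNat : Nat) : Int) ≤ (m : Int)
      · rw [if_pos hza, if_pos (by omega)]
      · rw [if_neg hza, if_neg (by omega)]

-- the fully-run prefix row reads back the prefix sums
lemma prefix_full (row : List Int) (w : Int) (hw : 1 ≤ w) (hlen : w ≤ row.length)
    (j : Int) (h0 : 0 ≤ j) (h1 : j < w) :
    PySem.List.pyGetD
      ((PySem.List.pyRange 1 w 1).foldl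
        (fun p j => PySem.List.pySetD p j (PySem.List.pyGetD p j 0 + PySem.List.pyGetD p (j-1) 0))
        ((PySem.List.pyRange 0 w 1).map (fun j => PySem.List.pyGetD row j 0))) j 0
    = Sp row (j + 1) := by
  have hw' : w = ((w.toNat - 1 : Nat) : Int) + 1 := by omega
  have h := (prefix_invariant row w hw hlen (w.toNat - 1) (by omega)).2 j h0 h1
  rw [if_pos (by omega)] at h
  rw [hw'] at h ⊢
  exact h

-- B's first loop: the sum of row[0..a-1]
lemma sum_first (row : List Int) (a : Nat) (ha : (a : Int) ≤ row.length) :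
    (PySem.List.pyRange 0 (a : Int) 1).foldl (fun s j => s + PySem.List.pyGetD row j 0) 0
      = Sp row a := by
  induction a with
  | zero => simp [PySem.List.pyRange_one_eq_nil, Sp]
  | succ a ih =>
    have ha' : (a : Int) ≤ row.length := by push_cast at ha ⊢; omega
    rw [show ((a + 1 : Nat) : Int) = (a : Int) + 1 by omega,
      PySem.List.pyRange_one_succ_right (by omega), List.foldl_append]
    simp only [List.foldl_cons, List.foldl_nil]
    rw [ih ha', getRow row a (by omega) (by push_cast at ha ⊢; omega)]
    ring

-- B's sliding loop tracks the window sum and agrees with the max-fold of window sums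
lemma slide (row : List Int) (n : Nat) :
    ∀ (a m0 s : Int), 10 ≤ a → a + n ≤ (row.length : Int) →
      s = Sp row a - Sp row (a - 10) →
    ((PySem.List.pyRange a (a + (n : Int)) 1).foldl
      (fun bs j =>
        (max bs.1 (bs.2 + PySem.List.pyGetD row j 0 - PySem.List.pyGetD row (j - 10) 0),
         bs.2 + PySem.List.pyGetD row j 0 - PySem.List.pyGetD row (j - 10) 0))
      (m0, s)).1
    = (PySem.List.pyRange a (a + (n : Int)) 1).foldl
        (fun m j => max m (Sp row (j + 1) - Sp row (j - 9))) m0 := by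
  induction n with
  | zero =>
    intro a m0 s _ _ _
    rw [show a + ((0 : Nat) : Int) = a by simp, PySem.List.pyRange_one_eq_nil le_rfl]
    rfl
  | succ n ih =>
    intro a m0 s ha hb hs
    rw [show a + ((n + 1 : Nat) : Int) = (a + 1) + (n : Int) by omega,
      PySem.List.pyRange_one_cons (by push_cast at hb ⊢; omega)]
    simp only [List.foldl_cons]
    rw [ih (a + 1) (max m0 (s + PySem.List.pyGetD row a 0 - PySem.List.pyGetD row (a - 10) 0))
      (s + PySem.List.pyGetD row a 0 - PySem.List.pyGetD row (a - 10) 0)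
      (by omega) (by push_cast at hb ⊢; omega)
      (by
        rw [hs, getRow row a (by omega) (by push_cast at hb ⊢; omega),
          getRow row (a - 10) (by omega) (by push_cast at hb ⊢; omega)]
        rw [show a - 10 + 1 = a - 9 by ring, show a + 1 - 10 = a - 9 by ring]
        ring)]
    congr 1
    rw [hs, getRow row a (by omega) (by push_cast at hb ⊢; omega),
      getRow row (a - 10) (by omega) (by push_cast at hb ⊢; omega)]
    rw [show a - 10 + 1 = a - 9 by ring]
    congr 1
    ring

-- ===== VERDICT (by name: the statement is the Claim_ definition above) =====
theorem sum_horizontal_spec : Claim_equal_sum_horizontal := by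
  intro A _ hpre
  obtain ⟨hne, hpos, hrows⟩ := hpre
  have hg : PySem.List.pyGetD A 0 [] = A.headD [] := by
    cases A with
    | nil => exact absurd rfl hne
    | cons x t => simp [PySem.List.pyGetD_zero_cons]
  have hw1 : (1 : Int) ≤ ((A.headD []).length : Int) := by omega
  simp only [Spec_sum_horizontal, sum_horizontal, sum_horizontal_alt]
  rw [hg]
  split_ifs with hcase
  · -- width ≤ 10 : one full-row window per row
    rw [List.foldl_map]
    apply PySem.List.foldl_congr_mem
    intro m row hrow
    have hlen : ((A.headD []).length : Int) ≤ (row.length : Int) := by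
      have := hrows row hrow; omega
    rw [prefix_full row _ hw1 hlen _ (by omega) (by omega),
      show ((A.headD []).length : Int) - 1 + 1 = ((A.headD []).length : Int) by ring]
    have hsum := sum_first row (A.headD []).length (by omega)
    rw [hsum, PySem.List.pyRange_one_eq_nil (le_refl ((A.headD []).length : Int))]
    rfl
  · -- width > 10 : sliding windows of 10
    rw [List.foldl_map]
    apply PySem.List.foldl_congr_mem
    intro m row hrow
    have hlen : ((A.headD []).length : Int) ≤ (row.length : Int) := by
      have := hrows row hrow; omega
    rw [prefix_full row _ hw1 hlen 9 (by norm_num) (by omega),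
      show (9 : Int) + 1 = 10 by norm_num]
    have hsum := sum_first row 10 (by omega)
    rw [show ((10 : Nat) : Int) = (10 : Int) by norm_num] at hsum
    rw [hsum]
    have hB := slide row ((A.headD []).length - 10) 10 (max m (Sp row 10)) (Sp row 10)
      (le_refl 10) (by omega) (by simp [Sp])
    rw [show (10 : Int) + (((A.headD []).length - 10 : Nat) : Int) = ((A.headD []).length : Int)
      by omega] at hB
    rw [hB]
    apply PySem.List.foldl_congr_mem
    intro acc j hj
    rw [PySem.List.mem_pyRange_one] at hj
    rw [prefix_full row _ hw1 hlen j (by omega) (by omega),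
      prefix_full row _ hw1 hlen (j - 10) (by omega) (by omega),
      show j - 10 + 1 = j - 9 by ring]
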